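-- pv_equiv track=rewrite | github.com/grimmsgadgets-cmyk/actortracker | priority_questions.py | expected_output_line
-- ===== SOURCE A (Python) =====
-- def expected_output_line(question_text: str) -> str:
--     lowered = question_text.lower()
--     if any(token in lowered for token in ('cve', 'vpn', 'edge', 'exploit', 'initial access')):
--         return 'Record edge exposure delta, affected assets, and confidence shift with source links.'
--     if any(token in lowered for token in ('powershell', 'wmi', 'scheduled task', 'execution')):
--         return 'Record execution pattern delta, impacted hosts, and confidence shift with source links.'
--     if any(token in lowered for token in ('lateral', 'rdp', 'smb', 'pivot')):
--         return 'Record lateral movement delta, host relationships, and confidence shift with source links.'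
--     if any(token in lowered for token in ('dns', 'domain', 'c2', 'beacon', 'command-and-control')):
--         return 'Record outbound beacon/domain delta, cadence, and confidence shift with source links.'
--     if any(token in lowered for token in ('exfiltrat', 'stolen data', 'collection')):
--         return 'Record staging or exfiltration delta, data scope, and confidence shift with source links.'
--     if any(token in lowered for token in ('encrypt', 'ransom', 'impact', 'disrupt')):
--         return 'Record impact behavior delta, business effect, and confidence shift with source links.'
--     return 'Record the observed delta versus prior review, confidence shift, and source links.'
-- ===== SOURCE B (Python) =====
-- _TOKEN_CATEGORY = {
--     'cve': 0, 'vpn': 0, 'edge': 0, 'exploit': 0, 'initial access': 0,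
--     'powershell': 1, 'wmi': 1, 'scheduled task': 1, 'execution': 1,
--     'lateral': 2, 'rdp': 2, 'smb': 2, 'pivot': 2,
--     'dns': 3, 'domain': 3, 'c2': 3, 'beacon': 3, 'command-and-control': 3,
--     'exfiltrat': 4, 'stolen data': 4, 'collection': 4,
--     'encrypt': 5, 'ransom': 5, 'impact': 5, 'disrupt': 5,
-- }
--
-- _MESSAGES = [
--     'Record edge exposure delta, affected assets, and confidence shift with source links.',
--     'Record execution pattern delta, impacted hosts, and confidence shift with source links.',
--     'Record lateral movement delta, host relationships, and confidence shift with source links.',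
--     'Record outbound beacon/domain delta, cadence, and confidence shift with source links.',
--     'Record staging or exfiltration delta, data scope, and confidence shift with source links.',
--     'Record impact behavior delta, business effect, and confidence shift with source links.',
-- ]
--
-- _DEFAULT = 'Record the observed delta versus prior review, confidence shift, and source links.'
--
--
-- def expected_output_line(question_text: str) -> str:
--     # Multi-pattern scan of the text itself: walk every start position of the
--     # lowered text once and test which tokens begin there, keeping the best
--     # (lowest) category seen anywhere in the text.
--     lowered = question_text.lower()
--     best = 6
--     for i in range(len(lowered)):
--         for token, category in _TOKEN_CATEGORY.items():
--             if category < best and lowered.startswith(token, i):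
--                 best = category
--     return _MESSAGES[best] if best < 6 else _DEFAULT
-- ===== Notes on version B (the rewrite author's own statement) =====
-- stated objective: alternative
-- what changed: Replaces A's six ordered group checks, each using Python's built-in substring membership per token, by a naive multi-pattern text scan: one walk over every start position of the lowered text, testing with startswith which tokens begin there and keeping the lowest-numbered category seen.
import Mathlib
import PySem

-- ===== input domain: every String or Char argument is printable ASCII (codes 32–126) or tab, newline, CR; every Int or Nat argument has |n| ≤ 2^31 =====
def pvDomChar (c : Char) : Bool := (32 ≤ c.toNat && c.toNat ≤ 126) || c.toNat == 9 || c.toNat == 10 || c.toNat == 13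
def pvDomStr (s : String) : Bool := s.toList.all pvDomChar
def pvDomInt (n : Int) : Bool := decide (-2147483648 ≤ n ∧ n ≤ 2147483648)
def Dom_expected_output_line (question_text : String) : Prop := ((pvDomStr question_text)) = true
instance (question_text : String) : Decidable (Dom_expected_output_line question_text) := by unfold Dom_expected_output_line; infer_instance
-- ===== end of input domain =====

-- B replaces A's six ordered substring-membership group checks by a positional multi-pattern
-- scan of the text itself (a startswith test per start position, keeping the best category);
-- objective: alternative decomposition, same cost.

-- ===== PORT A =====
def expected_output_line (question_text : String) : String :=
  let lowered := PySem.Str.lower question_text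
  if (["cve", "vpn", "edge", "exploit", "initial access"].any fun token => PySem.Str.isIn token lowered) then
    "Record edge exposure delta, affected assets, and confidence shift with source links."
  else if (["powershell", "wmi", "scheduled task", "execution"].any fun token => PySem.Str.isIn token lowered) then
    "Record execution pattern delta, impacted hosts, and confidence shift with source links."
  else if (["lateral", "rdp", "smb", "pivot"].any fun token => PySem.Str.isIn token lowered) then
    "Record lateral movement delta, host relationships, and confidence shift with source links."
  else if (["dns", "domain", "c2", "beacon", "command-and-control"].any fun token => PySem.Str.isIn token lowered) then
    "Record outbound beacon/domain delta, cadence, and confidence shift with source links."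
  else if (["exfiltrat", "stolen data", "collection"].any fun token => PySem.Str.isIn token lowered) then
    "Record staging or exfiltration delta, data scope, and confidence shift with source links."
  else if (["encrypt", "ransom", "impact", "disrupt"].any fun token => PySem.Str.isIn token lowered) then
    "Record impact behavior delta, business effect, and confidence shift with source links."
  else
    "Record the observed delta versus prior review, confidence shift, and source links."

-- ===== PORT B =====
-- Source B's _TOKEN_CATEGORY dict in insertion order
def pvTokenTable : List (String × Nat) :=
  [("cve", 0), ("vpn", 0), ("edge", 0), ("exploit", 0), ("initial access", 0),
   ("powershell", 1), ("wmi", 1), ("scheduled task", 1), ("execution", 1),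
   ("lateral", 2), ("rdp", 2), ("smb", 2), ("pivot", 2),
   ("dns", 3), ("domain", 3), ("c2", 3), ("beacon", 3), ("command-and-control", 3),
   ("exfiltrat", 4), ("stolen data", 4), ("collection", 4),
   ("encrypt", 5), ("ransom", 5), ("impact", 5), ("disrupt", 5)]

def pvMessages : List String :=
  ["Record edge exposure delta, affected assets, and confidence shift with source links.",
   "Record execution pattern delta, impacted hosts, and confidence shift with source links.",
   "Record lateral movement delta, host relationships, and confidence shift with source links.",
   "Record outbound beacon/domain delta, cadence, and confidence shift with source links.",
   "Record staging or exfiltration delta, data scope, and confidence shift with source links.",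
   "Record impact behavior delta, business effect, and confidence shift with source links."]

-- the inner loop body: 'if category < best and lowered.startswith(token, i): best = category';
-- Python's startswith(token, i) with 0 ≤ i is exactly Chars.startswith on (lowered.drop i)
def pvInnerStep (suffix : List Char) (best : Nat) (tc : String × Nat) : Nat :=
  if decide (tc.2 < best) && PySem.Chars.startswith suffix tc.1.toList then tc.2 else best

def expected_output_line_alt (question_text : String) : String :=
  let lowered := (PySem.Str.lower question_text).toList
  let best := (List.range lowered.length).foldl
      (fun b i => pvTokenTable.foldl (pvInnerStep (lowered.drop i)) b) 6
  -- best is always 0..5 here, so pyGet? never returns none; ".getD" only totalises the lookup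
  if best < 6 then (PySem.List.pyGet? pvMessages (best : Int)).getD ""
  else "Record the observed delta versus prior review, confidence shift, and source links."

-- ===== PRECONDITION & SPEC =====
def Spec_expected_output_line (question_text : String) (out : String) : Prop := out = expected_output_line_alt question_text
instance (question_text : String) (out : String) : Decidable (Spec_expected_output_line question_text out) := by unfold Spec_expected_output_line; infer_instance

-- ===== CLAIM (what is proved, stated in full; the proofs are below) =====
def Claim_equal_expected_output_line : Prop := ∀ (question_text : String), Dom_expected_output_line question_text → Spec_expected_output_line question_text (expected_output_line question_text)

-- ===== LEMMAS AND PROOFS =====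

-- canonical value contributed by one token at one start position
def pvTokVal (suffix : List Char) (tc : String × Nat) : Nat :=
  if PySem.Chars.startswith suffix tc.1.toList then tc.2 else 6

-- best category matched at start position i (canonical min-fold form)
def pvW (L : List Char) (i : Nat) : Nat :=
  pvTokenTable.foldl (fun b tc => min b (pvTokVal (L.drop i) tc)) 6

-- best category matched anywhere in L
def pvBest (L : List Char) : Nat :=
  (List.range L.length).foldl (fun b i => min b (pvW L i)) 6

theorem pvStep_eq_min (suffix : List Char) (b : Nat) (tc : String × Nat) (hb : b ≤ 6) :
    pvInnerStep suffix b tc = min b (pvTokVal suffix tc) := by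
  unfold pvInnerStep pvTokVal
  by_cases hsw : PySem.Chars.startswith suffix tc.1.toList = true
  · by_cases hlt : tc.2 < b
    · simp [hsw, hlt]; omega
    · simp [hsw, hlt]; omega
  · rw [Bool.not_eq_true] at hsw
    simp [hsw]; omega

-- generic min-fold facts
theorem pvMinfold_le_init {α : Type} (v : α → Nat) (l : List α) (b : Nat) :
    l.foldl (fun b x => min b (v x)) b ≤ b := by
  induction l generalizing b with
  | nil => exact le_refl b
  | cons x l ih => exact le_trans (ih (min b (v x))) (Nat.min_le_left _ _)

theorem pvMinfold_le_mem {α : Type} (v : α → Nat) (l : List α) (b : Nat) (x : α) (h : x ∈ l) :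
    l.foldl (fun b x => min b (v x)) b ≤ v x := by
  induction l generalizing b with
  | nil => cases h
  | cons y l ih =>
    rcases List.mem_cons.mp h with rfl | h'
    · exact le_trans (pvMinfold_le_init v l _) (Nat.min_le_right _ _)
    · exact ih (min b (v y)) h'

theorem pvMinfold_cases {α : Type} (v : α → Nat) (l : List α) (b : Nat) :
    l.foldl (fun b x => min b (v x)) b = b ∨ ∃ x ∈ l, l.foldl (fun b x => min b (v x)) b = v x := by
  induction l generalizing b with
  | nil => exact Or.inl rfl
  | cons y l ih =>
    rw [List.foldl_cons]
    rcases ih (min b (v y)) with h | ⟨x, hx, hv⟩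
    · by_cases hbv : b ≤ v y
      · exact Or.inl (h.trans (Nat.min_eq_left hbv))
      · exact Or.inr ⟨y, List.mem_cons_self, h.trans (Nat.min_eq_right (by omega))⟩
    · exact Or.inr ⟨x, List.mem_cons_of_mem _ hx, hv⟩

-- the inner fold in canonical min form
theorem pvInner_eq (suffix : List Char) (l : List (String × Nat)) (b : Nat) (hb : b ≤ 6) :
    l.foldl (pvInnerStep suffix) b = l.foldl (fun b tc => min b (pvTokVal suffix tc)) b := by
  induction l generalizing b with
  | nil => rfl
  | cons tc l ih =>
    rw [List.foldl_cons, List.foldl_cons, pvStep_eq_min suffix b tc hb]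
    exact ih (min b (pvTokVal suffix tc)) (le_trans (Nat.min_le_left _ _) hb)

theorem pvMinfold_init {α : Type} (v : α → Nat) (l : List α) (b c : Nat) :
    l.foldl (fun b x => min b (v x)) (min b c) = min b (l.foldl (fun b x => min b (v x)) c) := by
  induction l generalizing c with
  | nil => rfl
  | cons x l ih =>
    rw [List.foldl_cons, List.foldl_cons, Nat.min_assoc, ih]

-- the whole double fold equals pvBest
theorem pvOuter_eq (L : List Char) (l : List Nat) (b : Nat) (hb : b ≤ 6) :
    l.foldl (fun b i => pvTokenTable.foldl (pvInnerStep (L.drop i)) b) b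
      = l.foldl (fun b i => min b (pvW L i)) b := by
  induction l generalizing b with
  | nil => simp
  | cons i l ih =>
    rw [List.foldl_cons, List.foldl_cons, pvInner_eq _ _ _ hb]
    have hmin := pvMinfold_init (pvTokVal (L.drop i)) pvTokenTable b 6
    rw [Nat.min_eq_left hb] at hmin
    rw [hmin, ih _ (le_trans (Nat.min_le_left _ _) hb)]
    rfl

theorem pvAlt_eq (q : String) :
    expected_output_line_alt q =
      (if pvBest ((PySem.Str.lower q).toList) < 6 then
        (PySem.List.pyGet? pvMessages ((pvBest ((PySem.Str.lower q).toList)) : Int)).getD ""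
       else "Record the observed delta versus prior review, confidence shift, and source links.") := by
  simp only [expected_output_line_alt]
  rw [pvOuter_eq _ _ 6 (le_refl 6)]
  rfl

-- upper bound: a matched token bounds pvBest
theorem pvBest_le (L : List Char) (tc : String × Nat) (htc : tc ∈ pvTokenTable)
    (hne : tc.1.toList ≠ []) (h : PySem.Chars.isIn tc.1.toList L = true) : pvBest L ≤ tc.2 := by
  obtain ⟨j, hj⟩ := (PySem.Chars.exists_prefix_drop_iff_isIn _ _).mpr h
  have hjlt : j < L.length := by
    by_contra hge
    rw [List.drop_eq_nil_of_le (le_of_not_gt hge)] at hj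
    exact hne (List.prefix_nil.mp hj)
  have h1 : pvBest L ≤ pvW L j :=
    pvMinfold_le_mem _ _ _ j (List.mem_range.mpr hjlt)
  have h2 : pvW L j ≤ pvTokVal (L.drop j) tc := pvMinfold_le_mem _ _ _ tc htc
  have h3 : pvTokVal (L.drop j) tc = tc.2 := by
    unfold pvTokVal
    rw [(PySem.Chars.startswith_iff _ _).mpr hj]
    rfl
  omega

-- pvBest is 6 or the category of some matched token
theorem pvBest_cases (L : List Char) :
    pvBest L = 6 ∨ ∃ tc ∈ pvTokenTable, pvBest L = tc.2 ∧ PySem.Chars.isIn tc.1.toList L = true := by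
  rcases pvMinfold_cases (pvW L) (List.range L.length) 6 with h | ⟨i, hi, hv⟩
  · exact Or.inl h
  · rcases pvMinfold_cases (pvTokVal (L.drop i)) pvTokenTable 6 with h6 | ⟨tc, htc, hvtc⟩
    · exact Or.inl (by rw [pvBest, hv, pvW, h6])
    · by_cases hsw : PySem.Chars.startswith (L.drop i) tc.1.toList = true
      · refine Or.inr ⟨tc, htc, ?_, ?_⟩
        · rw [pvBest, hv, pvW, hvtc, pvTokVal, hsw]; rfl
        · exact (PySem.Chars.exists_prefix_drop_iff_isIn _ _).mp
            ⟨i, (PySem.Chars.startswith_iff _ _).mp hsw⟩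
      · rw [Bool.not_eq_true] at hsw
        refine Or.inl ?_
        rw [pvBest, hv, pvW, hvtc, pvTokVal, hsw]
        rfl

-- lower bound from known non-matches
theorem pvBest_ge (L : List Char) (g : Nat)
    (h : ∀ tc ∈ pvTokenTable, tc.2 < g → PySem.Chars.isIn tc.1.toList L = false) :
    g ≤ pvBest L ∨ pvBest L = 6 := by
  rcases pvBest_cases L with h6 | ⟨tc, htc, heq, hin⟩
  · exact Or.inr h6
  · by_cases hlt : tc.2 < g
    · rw [h tc htc hlt] at hin; cases hin
    · exact Or.inl (by omega)

-- a token of category g matches and nothing of lower category does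
theorem pvTable_ne : ∀ tc ∈ pvTokenTable, tc.1.toList ≠ [] := by decide

theorem pvBest_group (L : List Char) (g : Nat) (hg : g < 6)
    (hup : ∃ tc ∈ pvTokenTable, tc.2 = g ∧ PySem.Chars.isIn tc.1.toList L = true)
    (hlow : ∀ tc ∈ pvTokenTable, tc.2 < g → PySem.Chars.isIn tc.1.toList L = false) :
    pvBest L = g := by
  obtain ⟨tc, htc, hcat, hin⟩ := hup
  have h1 := pvBest_le L tc htc (pvTable_ne tc htc) hin
  rcases pvBest_ge L g hlow with h2 | h2 <;> omega

-- ===== VERDICT (by name: the statement is the Claim_ definition above) =====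
theorem expected_output_line_spec : Claim_equal_expected_output_line := by
  intro q _
  unfold Spec_expected_output_line
  rw [pvAlt_eq]
  simp only [expected_output_line]
  by_cases h0 : (["cve", "vpn", "edge", "exploit", "initial access"].any fun token => PySem.Str.isIn token (PySem.Str.lower q)) = true
  · rw [if_pos h0]
    have hb : pvBest (PySem.Str.lower q).toList = 0 := by
      apply pvBest_group _ 0 (by omega)
      · simp only [List.any_eq_true, List.mem_cons, List.not_mem_nil, or_false, PySem.Str.isIn_eq] at h0
        obtain ⟨t, ht, hin⟩ := h0
        refine ⟨(t, 0), ?_, rfl, hin⟩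
        rcases ht with rfl|rfl|rfl|rfl|rfl <;> simp [pvTokenTable]
      · intro tc htc hlt; exact absurd hlt (by omega)
    rw [hb]
    simp [pvMessages, PySem.List.pyGet?, PySem.List.pyIdx?]
  rw [if_neg h0]
  simp only [List.any_eq_true, List.mem_cons, List.not_mem_nil, or_false, PySem.Str.isIn_eq,
      not_exists, not_and, Bool.not_eq_true] at h0
  by_cases h1 : (["powershell", "wmi", "scheduled task", "execution"].any fun token => PySem.Str.isIn token (PySem.Str.lower q)) = true
  · rw [if_pos h1]
    have hb : pvBest (PySem.Str.lower q).toList = 1 := by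
      apply pvBest_group _ 1 (by omega)
      · simp only [List.any_eq_true, List.mem_cons, List.not_mem_nil, or_false, PySem.Str.isIn_eq] at h1
        obtain ⟨t, ht, hin⟩ := h1
        refine ⟨(t, 1), ?_, rfl, hin⟩
        rcases ht with rfl|rfl|rfl|rfl <;> simp [pvTokenTable]
      · intro tc htc hlt
        simp only [pvTokenTable, List.mem_cons, List.not_mem_nil, or_false] at htc
        rcases htc with rfl|rfl|rfl|rfl|rfl|rfl|rfl|rfl|rfl|rfl|rfl|rfl|rfl|rfl|rfl|rfl|rfl|rfl|rfl|rfl|rfl|rfl|rfl|rfl|rfl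
        · exact h0 "cve" (by simp)
        · exact h0 "vpn" (by simp)
        · exact h0 "edge" (by simp)
        · exact h0 "exploit" (by simp)
        · exact h0 "initial access" (by simp)
        · exact absurd hlt (by decide)
        · exact absurd hlt (by decide)
        · exact absurd hlt (by decide)
        · exact absurd hlt (by decide)
        · exact absurd hlt (by decide)
        · exact absurd hlt (by decide)
        · exact absurd hlt (by decide)
        · exact absurd hlt (by decide)
        · exact absurd hlt (by decide)
        · exact absurd hlt (by decide)
        · exact absurd hlt (by decide)
        · exact absurd hlt (by decide)
        · exact absurd hlt (by decide)
        · exact absurd hlt (by decide)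
        · exact absurd hlt (by decide)
        · exact absurd hlt (by decide)
        · exact absurd hlt (by decide)
        · exact absurd hlt (by decide)
        · exact absurd hlt (by decide)
        · exact absurd hlt (by decide)
    rw [hb]
    simp [pvMessages, PySem.List.pyGet?, PySem.List.pyIdx?]
  rw [if_neg h1]
  simp only [List.any_eq_true, List.mem_cons, List.not_mem_nil, or_false, PySem.Str.isIn_eq,
      not_exists, not_and, Bool.not_eq_true] at h1
  by_cases h2 : (["lateral", "rdp", "smb", "pivot"].any fun token => PySem.Str.isIn token (PySem.Str.lower q)) = true
  · rw [if_pos h2]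
    have hb : pvBest (PySem.Str.lower q).toList = 2 := by
      apply pvBest_group _ 2 (by omega)
      · simp only [List.any_eq_true, List.mem_cons, List.not_mem_nil, or_false, PySem.Str.isIn_eq] at h2
        obtain ⟨t, ht, hin⟩ := h2
        refine ⟨(t, 2), ?_, rfl, hin⟩
        rcases ht with rfl|rfl|rfl|rfl <;> simp [pvTokenTable]
      · intro tc htc hlt
        simp only [pvTokenTable, List.mem_cons, List.not_mem_nil, or_false] at htc
        rcases htc with rfl|rfl|rfl|rfl|rfl|rfl|rfl|rfl|rfl|rfl|rfl|rfl|rfl|rfl|rfl|rfl|rfl|rfl|rfl|rfl|rfl|rfl|rfl|rfl|rfl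
        · exact h0 "cve" (by simp)
        · exact h0 "vpn" (by simp)
        · exact h0 "edge" (by simp)
        · exact h0 "exploit" (by simp)
        · exact h0 "initial access" (by simp)
        · exact h1 "powershell" (by simp)
        · exact h1 "wmi" (by simp)
        · exact h1 "scheduled task" (by simp)
        · exact h1 "execution" (by simp)
        · exact absurd hlt (by decide)
        · exact absurd hlt (by decide)
        · exact absurd hlt (by decide)
        · exact absurd hlt (by decide)
        · exact absurd hlt (by decide)
        · exact absurd hlt (by decide)
        · exact absurd hlt (by decide)
        · exact absurd hlt (by decide)
        · exact absurd hlt (by decide)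
        · exact absurd hlt (by decide)
        · exact absurd hlt (by decide)
        · exact absurd hlt (by decide)
        · exact absurd hlt (by decide)
        · exact absurd hlt (by decide)
        · exact absurd hlt (by decide)
        · exact absurd hlt (by decide)
    rw [hb]
    simp [pvMessages, PySem.List.pyGet?, PySem.List.pyIdx?]
  rw [if_neg h2]
  simp only [List.any_eq_true, List.mem_cons, List.not_mem_nil, or_false, PySem.Str.isIn_eq,
      not_exists, not_and, Bool.not_eq_true] at h2
  by_cases h3 : (["dns", "domain", "c2", "beacon", "command-and-control"].any fun token => PySem.Str.isIn token (PySem.Str.lower q)) = true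
  · rw [if_pos h3]
    have hb : pvBest (PySem.Str.lower q).toList = 3 := by
      apply pvBest_group _ 3 (by omega)
      · simp only [List.any_eq_true, List.mem_cons, List.not_mem_nil, or_false, PySem.Str.isIn_eq] at h3
        obtain ⟨t, ht, hin⟩ := h3
        refine ⟨(t, 3), ?_, rfl, hin⟩
        rcases ht with rfl|rfl|rfl|rfl|rfl <;> simp [pvTokenTable]
      · intro tc htc hlt
        simp only [pvTokenTable, List.mem_cons, List.not_mem_nil, or_false] at htc
        rcases htc with rfl|rfl|rfl|rfl|rfl|rfl|rfl|rfl|rfl|rfl|rfl|rfl|rfl|rfl|rfl|rfl|rfl|rfl|rfl|rfl|rfl|rfl|rfl|rfl|rfl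
        · exact h0 "cve" (by simp)
        · exact h0 "vpn" (by simp)
        · exact h0 "edge" (by simp)
        · exact h0 "exploit" (by simp)
        · exact h0 "initial access" (by simp)
        · exact h1 "powershell" (by simp)
        · exact h1 "wmi" (by simp)
        · exact h1 "scheduled task" (by simp)
        · exact h1 "execution" (by simp)
        · exact h2 "lateral" (by simp)
        · exact h2 "rdp" (by simp)
        · exact h2 "smb" (by simp)
        · exact h2 "pivot" (by simp)
        · exact absurd hlt (by decide)
        · exact absurd hlt (by decide)
        · exact absurd hlt (by decide)
        · exact absurd hlt (by decide)
        · exact absurd hlt (by decide)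
        · exact absurd hlt (by decide)
        · exact absurd hlt (by decide)
        · exact absurd hlt (by decide)
        · exact absurd hlt (by decide)
        · exact absurd hlt (by decide)
        · exact absurd hlt (by decide)
        · exact absurd hlt (by decide)
    rw [hb]
    simp [pvMessages, PySem.List.pyGet?, PySem.List.pyIdx?]
  rw [if_neg h3]
  simp only [List.any_eq_true, List.mem_cons, List.not_mem_nil, or_false, PySem.Str.isIn_eq,
      not_exists, not_and, Bool.not_eq_true] at h3
  by_cases h4 : (["exfiltrat", "stolen data", "collection"].any fun token => PySem.Str.isIn token (PySem.Str.lower q)) = true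
  · rw [if_pos h4]
    have hb : pvBest (PySem.Str.lower q).toList = 4 := by
      apply pvBest_group _ 4 (by omega)
      · simp only [List.any_eq_true, List.mem_cons, List.not_mem_nil, or_false, PySem.Str.isIn_eq] at h4
        obtain ⟨t, ht, hin⟩ := h4
        refine ⟨(t, 4), ?_, rfl, hin⟩
        rcases ht with rfl|rfl|rfl <;> simp [pvTokenTable]
      · intro tc htc hlt
        simp only [pvTokenTable, List.mem_cons, List.not_mem_nil, or_false] at htc
        rcases htc with rfl|rfl|rfl|rfl|rfl|rfl|rfl|rfl|rfl|rfl|rfl|rfl|rfl|rfl|rfl|rfl|rfl|rfl|rfl|rfl|rfl|rfl|rfl|rfl|rfl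
        · exact h0 "cve" (by simp)
        · exact h0 "vpn" (by simp)
        · exact h0 "edge" (by simp)
        · exact h0 "exploit" (by simp)
        · exact h0 "initial access" (by simp)
        · exact h1 "powershell" (by simp)
        · exact h1 "wmi" (by simp)
        · exact h1 "scheduled task" (by simp)
        · exact h1 "execution" (by simp)
        · exact h2 "lateral" (by simp)
        · exact h2 "rdp" (by simp)
        · exact h2 "smb" (by simp)
        · exact h2 "pivot" (by simp)
        · exact h3 "dns" (by simp)
        · exact h3 "domain" (by simp)
        · exact h3 "c2" (by simp)
        · exact h3 "beacon" (by simp)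
        · exact h3 "command-and-control" (by simp)
        · exact absurd hlt (by decide)
        · exact absurd hlt (by decide)
        · exact absurd hlt (by decide)
        · exact absurd hlt (by decide)
        · exact absurd hlt (by decide)
        · exact absurd hlt (by decide)
        · exact absurd hlt (by decide)
    rw [hb]
    simp [pvMessages, PySem.List.pyGet?, PySem.List.pyIdx?]
  rw [if_neg h4]
  simp only [List.any_eq_true, List.mem_cons, List.not_mem_nil, or_false, PySem.Str.isIn_eq,
      not_exists, not_and, Bool.not_eq_true] at h4
  by_cases h5 : (["encrypt", "ransom", "impact", "disrupt"].any fun token => PySem.Str.isIn token (PySem.Str.lower q)) = true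
  · rw [if_pos h5]
    have hb : pvBest (PySem.Str.lower q).toList = 5 := by
      apply pvBest_group _ 5 (by omega)
      · simp only [List.any_eq_true, List.mem_cons, List.not_mem_nil, or_false, PySem.Str.isIn_eq] at h5
        obtain ⟨t, ht, hin⟩ := h5
        refine ⟨(t, 5), ?_, rfl, hin⟩
        rcases ht with rfl|rfl|rfl|rfl <;> simp [pvTokenTable]
      · intro tc htc hlt
        simp only [pvTokenTable, List.mem_cons, List.not_mem_nil, or_false] at htc
        rcases htc with rfl|rfl|rfl|rfl|rfl|rfl|rfl|rfl|rfl|rfl|rfl|rfl|rfl|rfl|rfl|rfl|rfl|rfl|rfl|rfl|rfl|rfl|rfl|rfl|rfl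
        · exact h0 "cve" (by simp)
        · exact h0 "vpn" (by simp)
        · exact h0 "edge" (by simp)
        · exact h0 "exploit" (by simp)
        · exact h0 "initial access" (by simp)
        · exact h1 "powershell" (by simp)
        · exact h1 "wmi" (by simp)
        · exact h1 "scheduled task" (by simp)
        · exact h1 "execution" (by simp)
        · exact h2 "lateral" (by simp)
        · exact h2 "rdp" (by simp)
        · exact h2 "smb" (by simp)
        · exact h2 "pivot" (by simp)
        · exact h3 "dns" (by simp)
        · exact h3 "domain" (by simp)
        · exact h3 "c2" (by simp)
        · exact h3 "beacon" (by simp)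
        · exact h3 "command-and-control" (by simp)
        · exact h4 "exfiltrat" (by simp)
        · exact h4 "stolen data" (by simp)
        · exact h4 "collection" (by simp)
        · exact absurd hlt (by decide)
        · exact absurd hlt (by decide)
        · exact absurd hlt (by decide)
        · exact absurd hlt (by decide)
    rw [hb]
    simp [pvMessages, PySem.List.pyGet?, PySem.List.pyIdx?]
  rw [if_neg h5]
  simp only [List.any_eq_true, List.mem_cons, List.not_mem_nil, or_false, PySem.Str.isIn_eq,
      not_exists, not_and, Bool.not_eq_true] at h5
  have hb : pvBest (PySem.Str.lower q).toList = 6 := by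
    have hge := pvBest_ge (PySem.Str.lower q).toList 6 ?_
    · have hle : pvBest (PySem.Str.lower q).toList ≤ 6 := pvMinfold_le_init _ _ _
      omega
    · intro tc htc hlt
      simp only [pvTokenTable, List.mem_cons, List.not_mem_nil, or_false] at htc
      rcases htc with rfl|rfl|rfl|rfl|rfl|rfl|rfl|rfl|rfl|rfl|rfl|rfl|rfl|rfl|rfl|rfl|rfl|rfl|rfl|rfl|rfl|rfl|rfl|rfl|rfl
      · exact h0 "cve" (by simp)
      · exact h0 "vpn" (by simp)
      · exact h0 "edge" (by simp)
      · exact h0 "exploit" (by simp)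
      · exact h0 "initial access" (by simp)
      · exact h1 "powershell" (by simp)
      · exact h1 "wmi" (by simp)
      · exact h1 "scheduled task" (by simp)
      · exact h1 "execution" (by simp)
      · exact h2 "lateral" (by simp)
      · exact h2 "rdp" (by simp)
      · exact h2 "smb" (by simp)
      · exact h2 "pivot" (by simp)
      · exact h3 "dns" (by simp)
      · exact h3 "domain" (by simp)
      · exact h3 "c2" (by simp)
      · exact h3 "beacon" (by simp)
      · exact h3 "command-and-control" (by simp)
      · exact h4 "exfiltrat" (by simp)
      · exact h4 "stolen data" (by simp)
      · exact h4 "collection" (by simp)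
      · exact h5 "encrypt" (by simp)
      · exact h5 "ransom" (by simp)
      · exact h5 "impact" (by simp)
      · exact h5 "disrupt" (by simp)
  rw [hb]
  norm_num
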